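-- pv_equiv track=rewrite | github.com/AlunStokes/CCAI | data_processing/src/utilities.py | has_hole
-- ===== SOURCE A (Python) =====
-- def has_hole(l, null_char=0):
--     l = l.copy()
--     i = 0
--     new_start = 0
--     new_end = 0
--     while i < len(l):
--         if l[i] != null_char:
--             new_start = i
--             break
--         i += 1
--     i = len(l) - 1
--     while i >= 0:
--         if l[i] != null_char:
--             new_end = i + 1
--             break
--         i -= 1
--
--     l = l[new_start:new_end + 1]
--     i = 0
--     while i < len(l):
--         if l[i] == null_char:
--             if i != 0 and i != len(l) - 1:
--                 return True
--         i += 1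
--     return False
-- ===== SOURCE B (Python) =====
-- def has_hole(l, null_char=0):
--     idx = [i for i, x in enumerate(l) if x != null_char]
--     if len(idx) < 2:
--         return False
--     return (idx[-1] - idx[0] + 1) != len(idx)
-- ===== Notes on version B (the rewrite author's own statement) =====
-- stated objective: simpler
-- what changed: Replaces A's three index loops (trim leading nulls, trim trailing nulls, scan the interior slice for a null) with one pass collecting non-null indices and the arithmetic test span != count.
import Mathlib
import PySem

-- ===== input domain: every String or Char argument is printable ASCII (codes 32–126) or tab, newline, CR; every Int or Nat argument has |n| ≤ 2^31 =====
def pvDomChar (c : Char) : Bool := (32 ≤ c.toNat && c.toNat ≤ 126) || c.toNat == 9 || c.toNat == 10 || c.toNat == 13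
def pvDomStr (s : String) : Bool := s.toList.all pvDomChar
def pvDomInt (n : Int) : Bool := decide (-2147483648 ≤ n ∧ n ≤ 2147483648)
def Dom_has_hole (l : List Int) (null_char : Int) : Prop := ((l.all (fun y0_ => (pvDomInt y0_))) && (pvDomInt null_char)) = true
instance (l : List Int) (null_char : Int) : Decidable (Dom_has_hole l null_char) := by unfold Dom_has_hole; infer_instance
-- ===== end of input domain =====

-- B replaces A's trim-both-ends-then-scan-interior loops by one pass collecting non-null
-- indices and the span-vs-count test (objective: simpler).

-- ===== PORT A =====
-- first while loop: i moves forward until l[i] != null_char, giving new_start (0 if none)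
def hasHoleLoopStart (l : List Int) (nc : Int) (i : Nat) : Nat :=
  if i < l.length then
    if l.getD i 0 ≠ nc then i else hasHoleLoopStart l nc (i + 1)
  else 0
termination_by l.length - i

-- second while loop: i moves backward from len-1; argument k is i+1 (k = 0 means i < 0)
def hasHoleLoopEnd (l : List Int) (nc : Int) : Nat → Nat
  | 0 => 0
  | k + 1 => if l.getD k 0 ≠ nc then k + 1 else hasHoleLoopEnd l nc k

-- third while loop over the trimmed slice: return True on an interior null
def hasHoleLoopScan (l2 : List Int) (nc : Int) (i : Nat) : Bool :=
  if i < l2.length then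
    if l2.getD i 0 = nc ∧ i ≠ 0 ∧ i ≠ l2.length - 1 then true
    else hasHoleLoopScan l2 nc (i + 1)
  else false
termination_by l2.length - i

def has_hole (l : List Int) (null_char : Int) : Bool :=
  let new_start := hasHoleLoopStart l null_char 0
  let new_end := hasHoleLoopEnd l null_char l.length
  let l2 := PySem.List.slice l (some (new_start : Int)) (some ((new_end : Int) + 1))
  hasHoleLoopScan l2 null_char 0

-- ===== PORT B =====
def has_hole_alt (l : List Int) (null_char : Int) : Bool :=
  let idx := ((PySem.List.enumerate l 0).filter (fun p => p.2 ≠ null_char)).map (·.1)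
  if idx.length < 2 then false
  else decide (PySem.List.pyGetD idx (-1) 0 - PySem.List.pyGetD idx 0 0 + 1 ≠ (idx.length : Int))

-- ===== PRECONDITION & SPEC =====
def Spec_has_hole (l : List Int) (null_char : Int) (out : Bool) : Prop := out = has_hole_alt l null_char
instance (l : List Int) (null_char : Int) (out : Bool) : Decidable (Spec_has_hole l null_char out) := by unfold Spec_has_hole; infer_instance

-- ===== CLAIM (what is proved, stated in full; the proofs are below) =====
def Claim_equal_has_hole : Prop := ∀ (l : List Int) (null_char : Int), Dom_has_hole l null_char → Spec_has_hole l null_char (has_hole l null_char)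


-- ===== LEMMAS AND PROOFS =====

-- characterization of A's interior-scan loop
theorem hh_scan_iff (l2 : List Int) (nc : Int) (i : Nat) :
    hasHoleLoopScan l2 nc i = true ↔
      ∃ j, i ≤ j ∧ j < l2.length ∧ l2.getD j 0 = nc ∧ j ≠ 0 ∧ j ≠ l2.length - 1 := by
  rw [hasHoleLoopScan]
  by_cases h : i < l2.length
  · rw [if_pos h]
    by_cases hc : l2.getD i 0 = nc ∧ i ≠ 0 ∧ i ≠ l2.length - 1
    · rw [if_pos hc]
      exact ⟨fun _ => ⟨i, le_refl i, h, hc.1, hc.2.1, hc.2.2⟩, fun _ => rfl⟩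
    · rw [if_neg hc, hh_scan_iff l2 nc (i + 1)]
      constructor
      · rintro ⟨j, hj1, hrest⟩; exact ⟨j, by omega, hrest⟩
      · rintro ⟨j, hj1, hj2, hv, h0, hlast⟩
        refine ⟨j, ?_, hj2, hv, h0, hlast⟩
        rcases Nat.eq_or_lt_of_le hj1 with rfl | hlt
        · exact absurd ⟨hv, h0, hlast⟩ hc
        · omega
  · rw [if_neg h]
    constructor
    · intro hF; exact absurd hF (by simp)
    · rintro ⟨j, hj1, hj2, _⟩; omega
termination_by l2.length - i
decreasing_by omega

-- A's forward loop stops at the least non-null index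
theorem hh_start_eq (l : List Int) (nc : Int) (a : Nat) (ha : a < l.length)
    (hpa : ¬ l.getD a 0 = nc) (hmin : ∀ j, j < a → l.getD j 0 = nc)
    (i : Nat) (hi : i ≤ a) : hasHoleLoopStart l nc i = a := by
  rw [hasHoleLoopStart]
  rcases Nat.eq_or_lt_of_le hi with rfl | hlt
  · rw [if_pos ha, if_pos hpa]
  · rw [if_pos (by omega), if_neg (not_not_intro (hmin i hlt))]
    exact hh_start_eq l nc a ha hpa hmin (i + 1) hlt
termination_by a - i
decreasing_by omega

-- A's forward loop finds nothing when every element is null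
theorem hh_start_all (l : List Int) (nc : Int)
    (hall : ∀ j, j < l.length → l.getD j 0 = nc) (i : Nat) :
    hasHoleLoopStart l nc i = 0 := by
  rw [hasHoleLoopStart]
  by_cases h : i < l.length
  · rw [if_pos h, if_neg (not_not_intro (hall i h))]
    exact hh_start_all l nc hall (i + 1)
  · rw [if_neg h]
termination_by l.length - i
decreasing_by omega

-- A's backward loop stops just past the greatest non-null index
theorem hh_end_eq (l : List Int) (nc : Int) (b : Nat) (hpb : ¬ l.getD b 0 = nc)
    (hmax : ∀ j, b < j → j < l.length → l.getD j 0 = nc)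
    (k : Nat) (hk1 : b < k) (hk2 : k ≤ l.length) : hasHoleLoopEnd l nc k = b + 1 := by
  match k with
  | 0 => omega
  | m + 1 =>
    rw [hasHoleLoopEnd]
    rcases Nat.eq_or_lt_of_le (Nat.le_of_lt_succ hk1) with rfl | hlt
    · rw [if_pos hpb]
    · rw [if_neg (not_not_intro (hmax m hlt (by omega)))]
      exact hh_end_eq l nc b hpb hmax m hlt (by omega)

-- A's backward loop finds nothing when every element is null
theorem hh_end_all (l : List Int) (nc : Int)
    (hall : ∀ j, j < l.length → l.getD j 0 = nc) (k : Nat) (hk : k ≤ l.length) :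
    hasHoleLoopEnd l nc k = 0 := by
  match k with
  | 0 => rw [hasHoleLoopEnd]
  | m + 1 =>
    rw [hasHoleLoopEnd, if_neg (not_not_intro (hall m (by omega)))]
    exact hh_end_all l nc hall m (by omega)

-- B's index list equals the filtered range of non-null positions
theorem hh_idx_eq (l : List Int) (nc : Int) (s : Nat) :
    ((PySem.List.enumerate l (s : Int)).filter (fun p => p.2 ≠ nc)).map (fun p => p.1)
      = ((List.range l.length).filter (fun i => l.getD i 0 ≠ nc)).map
          (fun i => ((s + i : Nat) : Int)) := by
  induction l generalizing s with
  | nil => simp [PySem.List.enumerate_nil]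
  | cons x xs ih =>
    rw [PySem.List.enumerate_cons, show (s : Int) + 1 = ((s + 1 : Nat) : Int) by push_cast; ring]
    rw [List.length_cons, List.range_succ_eq_map]
    rw [List.filter_cons, List.filter_cons]
    have hpred : (fun i => decide ((x :: xs).getD i 0 ≠ nc)) ∘ Nat.succ
        = fun i => decide (xs.getD i 0 ≠ nc) := by
      funext i; simp
    by_cases hx : x ≠ nc
    · rw [if_pos (by simpa using hx), if_pos (by simpa using hx)]
      rw [List.map_cons, List.map_cons, ih (s + 1), List.filter_map, hpred, List.map_map]
      refine congrArg₂ List.cons (by norm_num) ?_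
      exact List.map_congr_left (fun i _ => by
        simp only [Function.comp_apply, Nat.succ_eq_add_one]; push_cast; ring)
    · rw [if_neg (by simpa using hx), if_neg (by simpa using hx)]
      rw [ih (s + 1), List.filter_map, hpred, List.map_map]
      exact List.map_congr_left (fun i _ => by
        simp only [Function.comp_apply, Nat.succ_eq_add_one]; push_cast; ring)

-- Python's xs[0] and xs[-1] on a non-empty list
theorem hh_pyGetD_zero (x : Int) (xs : List Int) : PySem.List.pyGetD (x :: xs) 0 0 = x := by
  simp [PySem.List.pyGetD, PySem.List.pyGet?, PySem.List.pyIdx?]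

theorem hh_pyGetD_neg_one (xs : List Int) (h : xs ≠ []) :
    PySem.List.pyGetD xs (-1) 0 = xs.getLast?.getD 0 := by
  have hl : 0 < xs.length := List.length_pos_iff.mpr h
  simp only [PySem.List.pyGetD, PySem.List.pyGet?, PySem.List.pyIdx?, List.getLast?_eq_getElem?]
  rw [if_neg (by omega), if_pos (by omega)]
  simp

-- head of a strictly increasing list is minimal
theorem hh_head_min (a : Nat) (t : List Nat) (hp : (a :: t).Pairwise (· < ·)) :
    ∀ q ∈ a :: t, a ≤ q := by
  intro q hq
  rcases List.mem_cons.mp hq with rfl | hq'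
  · exact le_refl q
  · exact le_of_lt ((List.pairwise_cons.mp hp).1 q hq')

-- last of a strictly increasing list is maximal
theorem hh_last_max (t : List Nat) (ht : t ≠ []) (hp : t.Pairwise (· < ·)) :
    ∀ q ∈ t, q ≤ t.getLast ht := by
  match t with
  | [x] => intro q hq; simp_all
  | x :: y :: ys =>
    intro q hq
    rw [List.getLast_cons (by simp)]
    rcases List.mem_cons.mp hq with rfl | hq'
    · exact le_of_lt ((List.pairwise_cons.mp hp).1 _ (List.getLast_mem _))
    · exact hh_last_max (y :: ys) (by simp) (List.pairwise_cons.mp hp).2 q hq'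

-- ===== VERDICT (by name: the statement is the Claim_ definition above) =====
theorem has_hole_spec : Claim_equal_has_hole := by
  intro l nc _
  unfold Spec_has_hole
  rw [Bool.eq_iff_iff]
  have hidx0 : ((PySem.List.enumerate l 0).filter (fun p => p.2 ≠ nc)).map (fun p => p.1)
      = ((List.range l.length).filter (fun i => l.getD i 0 ≠ nc)).map (fun (i : Nat) => (i : Int)) := by
    have h := hh_idx_eq l nc 0
    simp only [Nat.cast_zero, Nat.zero_add] at h
    exact h
  by_cases hN : (List.range l.length).filter (fun i => l.getD i 0 ≠ nc) = []
  · -- every element is null: both sides are false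
    have hall : ∀ j, j < l.length → l.getD j 0 = nc := by
      intro j hj
      by_contra hc
      have hmem : j ∈ (List.range l.length).filter (fun i => l.getD i 0 ≠ nc) := by
        rw [List.mem_filter]
        exact ⟨List.mem_range.mpr hj, by simpa using hc⟩
      rw [hN] at hmem
      exact absurd hmem (List.not_mem_nil)
    have hA : has_hole l nc = false := by
      simp only [has_hole]
      rw [hh_start_all l nc hall 0, hh_end_all l nc hall l.length (le_refl _)]
      rw [show ((0 : Nat) : Int) + 1 = ((1 : Nat) : Int) by norm_num]
      rw [PySem.List.slice_natCast]
      rw [Bool.eq_false_iff]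
      intro h
      rw [hh_scan_iff] at h
      obtain ⟨j, _, hj2, _, h0, _⟩ := h
      have : (List.take (1 - 0) (List.drop 0 l)).length ≤ 1 := by
        simp [List.length_take]
      omega
    have hB : has_hole_alt l nc = false := by
      simp only [has_hole_alt]
      rw [hidx0, hN]
      simp
    rw [hA, hB]
  · obtain ⟨a, t, hN2⟩ : ∃ a t, (List.range l.length).filter (fun i => l.getD i 0 ≠ nc) = a :: t := by
      rcases hx : (List.range l.length).filter (fun i => l.getD i 0 ≠ nc) with _ | ⟨a, t⟩
      · exact absurd hx hN
      · exact ⟨a, t, rfl⟩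
    have hmemN : ∀ q, q ∈ a :: t ↔ q < l.length ∧ ¬ l.getD q 0 = nc := by
      intro q
      rw [← hN2]
      simp [List.mem_filter, List.mem_range]
    have hpair : (a :: t).Pairwise (· < ·) := hN2 ▸ (List.pairwise_lt_range.filter _)
    have hbne : (a :: t) ≠ [] := List.cons_ne_nil a t
    have ha := (hmemN a).mp (List.mem_cons_self)
    have hb := (hmemN ((a :: t).getLast hbne)).mp (List.getLast_mem hbne)
    have hminN : ∀ q ∈ a :: t, a ≤ q := hh_head_min a t hpair
    have hmaxN : ∀ q ∈ a :: t, q ≤ (a :: t).getLast hbne := hh_last_max (a :: t) hbne hpair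
    have hab : a ≤ (a :: t).getLast hbne := hminN _ (List.getLast_mem hbne)
    have hmin' : ∀ j, j < a → l.getD j 0 = nc := by
      intro j hj
      by_contra hc
      have := hminN j ((hmemN j).mpr ⟨by omega, hc⟩)
      omega
    have hmax' : ∀ j, (a :: t).getLast hbne < j → j < l.length → l.getD j 0 = nc := by
      intro j h1 h2
      by_contra hc
      have := hmaxN j ((hmemN j).mpr ⟨h2, hc⟩)
      omega
    set b := (a :: t).getLast hbne with hbdef
    -- A side: has_hole is true exactly when some strictly interior position is null
    have hA : has_hole l nc = true ↔ ∃ q, a < q ∧ q < b ∧ l.getD q 0 = nc := by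
      simp only [has_hole]
      rw [hh_start_eq l nc a ha.1 ha.2 hmin' 0 (Nat.zero_le a),
          hh_end_eq l nc b hb.2 hmax' l.length hb.1 (le_refl _)]
      rw [show ((b + 1 : Nat) : Int) + 1 = ((b + 2 : Nat) : Int) by push_cast; ring]
      rw [PySem.List.slice_natCast]
      have hL : (List.take (b + 2 - a) (List.drop a l)).length = min (b + 2 - a) (l.length - a) := by
        simp [List.length_take]
      have hget : ∀ j, j < b + 2 - a →
          (List.take (b + 2 - a) (List.drop a l)).getD j 0 = l.getD (a + j) 0 := by
        intro j hj
        rw [List.getD_eq_getElem?_getD, List.getElem?_take, if_pos hj, List.getElem?_drop,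
            ← List.getD_eq_getElem?_getD]
      rw [hh_scan_iff]
      have hbn := hb.1
      constructor
      · rintro ⟨j, -, hjL, hv, h0, hlast⟩
        rw [hL] at hjL hlast
        rw [hget j (by omega)] at hv
        have hne : a + j ≠ b := fun hEq => hb.2 (hEq ▸ hv)
        exact ⟨a + j, by omega, by omega, hv⟩
      · rintro ⟨q, h1, h2, h3⟩
        refine ⟨q - a, Nat.zero_le _, ?_, ?_, by omega, ?_⟩
        · rw [hL]; omega
        · rw [hget (q - a) (by omega), show a + (q - a) = q by omega]; exact h3
        · rw [hL]; omega
    -- counting: the number of non-null indices, summed over the three chunks of range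
    have hcount : (a :: t).length
        = List.countP ((fun i => decide (l.getD i 0 ≠ nc)) ∘ (fun x => a + x))
            (List.range (b + 1 - a)) := by
      have h1 : (a :: t).length
          = List.countP (fun i => decide (l.getD i 0 ≠ nc)) (List.range l.length) := by
        rw [← hN2, ← List.countP_eq_length_filter]
      have h2 : List.range l.length
          = List.range (b + 1) ++ (List.range (l.length - (b + 1))).map (fun x => (b + 1) + x) := by
        rw [← List.range_add]; congr 1; omega
      have h3 : List.range (b + 1)
          = List.range a ++ (List.range (b + 1 - a)).map (fun x => a + x) := by
        rw [← List.range_add]; congr 1; omega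
      have hz1 : List.countP (fun i => decide (l.getD i 0 ≠ nc)) (List.range a) = 0 := by
        rw [List.countP_eq_zero]
        intro q hq
        simp only [List.mem_range] at hq
        have hv := hmin' q hq
        rw [List.getD_eq_getElem?_getD] at hv
        simp [hv]
      have hz3 : List.countP ((fun i => decide (l.getD i 0 ≠ nc)) ∘ (fun x => (b + 1) + x))
          (List.range (l.length - (b + 1))) = 0 := by
        rw [List.countP_eq_zero]
        intro q hq
        simp only [List.mem_range] at hq
        have hv := hmax' ((b + 1) + q) (by omega) (by omega)
        rw [List.getD_eq_getElem?_getD] at hv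
        simp [Function.comp, hv]
      rw [h1, h2, List.countP_append, List.countP_map, hz3, h3, List.countP_append,
          List.countP_map, hz1]
      omega
    -- span-vs-count is exactly the existence of an interior null
    have hspan : (((b : Int)) - (a : Int) + 1 ≠ ((a :: t).length : Int))
        ↔ ∃ q, a < q ∧ q < b ∧ l.getD q 0 = nc := by
      have hle : (a :: t).length ≤ b + 1 - a := by
        rw [hcount]
        calc List.countP _ _ ≤ (List.range (b + 1 - a)).length := List.countP_le_length
        _ = b + 1 - a := List.length_range
      have hfull : (a :: t).length = b + 1 - a
          ↔ ∀ i, i < b + 1 - a → ¬ l.getD (a + i) 0 = nc := by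
        rw [hcount]
        constructor
        · intro h i hi
          have h2 := List.countP_eq_length.mp (h.trans List.length_range.symm)
          have h3 := h2 i (List.mem_range.mpr hi)
          simpa using h3
        · intro h
          refine (List.countP_eq_length.mpr ?_).trans List.length_range
          intro x hx
          have := h x (List.mem_range.mp hx)
          simpa using this
      constructor
      · intro hne
        have hlt : (a :: t).length ≠ b + 1 - a := by
          intro hEq; apply hne; rw [hEq]; omega
        have hx : ¬ ∀ i, i < b + 1 - a → ¬ l.getD (a + i) 0 = nc :=
          fun hall => hlt (hfull.mpr hall)
        push Not at hx
        obtain ⟨i, hi, hv⟩ := hx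
        have h0 : i ≠ 0 := by intro hEq; exact ha.2 (by simpa [hEq] using hv)
        have hnb : a + i ≠ b := fun hEq => hb.2 (hEq ▸ hv)
        exact ⟨a + i, by omega, by omega, hv⟩
      · rintro ⟨q, h1, h2, h3⟩ hEq
        have hEq' : (a :: t).length = b + 1 - a := by omega
        have := hfull.mp hEq' (q - a) (by omega)
        rw [show a + (q - a) = q by omega] at this
        exact this h3
    by_cases ht : t = []
    · -- a single non-null element: both sides are false
      subst ht
      have hba : b = a := by rw [hbdef]; rfl
      rw [hA]
      have hBf : has_hole_alt l nc = false := by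
        simp only [has_hole_alt]
        rw [hidx0, hN2]
        simp
      rw [hBf]
      constructor
      · rintro ⟨q, h1, h2, -⟩; omega
      · intro h; exact absurd h (by simp)
    · -- at least two non-null elements: B takes the span-vs-count branch
      have hB : has_hole_alt l nc = true
          ↔ (((b : Int)) - (a : Int) + 1 ≠ ((a :: t).length : Int)) := by
        simp only [has_hole_alt]
        rw [hidx0, hN2, List.map_cons]
        have hlen2 : 1 ≤ t.length := by
          rcases t with _ | _
          · exact absurd rfl ht
          · simp
        rw [if_neg (by simp; omega)]
        have hfst : PySem.List.pyGetD ((a : Int) :: t.map (fun (i : Nat) => (i : Int))) 0 0 = (a : Int) :=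
          hh_pyGetD_zero _ _
        have hlst : PySem.List.pyGetD ((a : Int) :: t.map (fun (i : Nat) => (i : Int))) (-1) 0
            = (b : Int) := by
          rw [hh_pyGetD_neg_one _ (List.cons_ne_nil _ _), ← List.map_cons,
              List.getLast?_map, List.getLast?_eq_some_getLast hbne, hbdef]
          rfl
        rw [hfst, hlst]
        simp
      rw [hA, hB, hspan]
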